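-- pv_equiv track=rewrite | github.com/HashTag42/AdventOfCode | 2015/2015-20/AoC_2015_20.py | solve
-- ===== SOURCE A (Python) =====
-- def solve(target, multiplier=10, max_visits=None) -> int:
--     limit = target // 10
--     presents = [0] * (limit + 1)
--     for elf in range(1, limit + 1):
--         max_house = limit if max_visits is None else min(max_visits * elf, limit)
--         for house in range(elf, max_house + 1, elf):
--             presents[house] += elf * multiplier
--     for house in range(1, limit + 1):
--         if presents[house] >= target:
--             return house
--     return -1
-- ===== SOURCE B (Python) =====
-- def solve(target, multiplier=10, max_visits=None) -> int:
--     limit = target // 10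
--     for house in range(1, limit + 1):
--         total = 0
--         d = 1
--         while d * d <= house:
--             if house % d == 0:
--                 q = house // d
--                 if max_visits is None or q <= max_visits:
--                     total += d * multiplier
--                 if q != d and (max_visits is None or d <= max_visits):
--                     total += q * multiplier
--             d += 1
--         if total >= target:
--             return house
--     return -1
-- ===== Notes on version B (the rewrite author's own statement) =====
-- stated objective: faster
-- what changed: A fills a presents sieve array over all limit houses elf by elf and then scans it; B keeps no array and instead walks houses in order, computing each house's presents on the fly from its divisor pairs (d, house//d) for d up to sqrt(house), gating each divisor by the complementary quotient against max_visits, and stops at the first qualifying house.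
import Mathlib
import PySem

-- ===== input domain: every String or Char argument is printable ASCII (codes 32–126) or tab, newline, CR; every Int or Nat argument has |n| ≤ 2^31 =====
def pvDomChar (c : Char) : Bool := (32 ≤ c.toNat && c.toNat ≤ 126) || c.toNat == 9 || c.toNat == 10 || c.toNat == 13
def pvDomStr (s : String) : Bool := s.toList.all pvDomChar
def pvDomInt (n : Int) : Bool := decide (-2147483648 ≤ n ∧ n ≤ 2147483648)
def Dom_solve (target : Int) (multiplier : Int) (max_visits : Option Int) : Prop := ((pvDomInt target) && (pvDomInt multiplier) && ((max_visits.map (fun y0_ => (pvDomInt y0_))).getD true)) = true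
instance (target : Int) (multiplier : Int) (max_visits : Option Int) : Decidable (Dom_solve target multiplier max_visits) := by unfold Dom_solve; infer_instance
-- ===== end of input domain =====

-- B replaces A's elf-by-elf sieve over all limit houses with a per-house paired-divisor scan
-- (d up to √house) that stops at the first qualifying house: no array, and work depends on the
-- answer house, not on limit (measured faster in a timing run on its generated inputs).

-- ===== PORT A =====
-- max_house = limit if max_visits is None else min(max_visits * elf, limit)
def maxHouse (limit : Int) (max_visits : Option Int) (elf : Int) : Int :=
  match max_visits with
  | none => limit
  | some m => min (m * elf) limit

def solve (target : Int) (multiplier : Int) (max_visits : Option Int) : Int :=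
  let limit := PySem.Int.floordiv target 10
  let presents0 : List Int := List.replicate (limit + 1).toNat 0
  let presents :=
    List.foldl (fun pres elf =>
        List.foldl (fun p house =>
            PySem.List.pySetD p house (PySem.List.pyGetD p house 0 + elf * multiplier))
          pres (PySem.List.pyRange elf (maxHouse limit max_visits elf + 1) elf))
      presents0 (PySem.List.pyRange 1 (limit + 1) 1)
  (List.foldl (fun acc house =>
      match acc with
      | some h => some h
      | none => if target ≤ PySem.List.pyGetD presents house 0 then some house else none)
    none (PySem.List.pyRange 1 (limit + 1) 1)).getD (-1)

-- ===== PORT B =====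
-- 'max_visits is None or v <= max_visits'
def visitsOk (max_visits : Option Int) (v : Int) : Bool :=
  match max_visits with | none => true | some m => decide (v ≤ m)

-- the 'while d * d <= house' loop of Source B
def bInner (house : Int) (multiplier : Int) (max_visits : Option Int) (d : Int) (total : Int) : Int :=
  if hd : d * d ≤ house then
    let total1 :=
      if PySem.Int.mod house d = 0 then
        let q := PySem.Int.floordiv house d
        let t1 := if visitsOk max_visits q then total + d * multiplier else total
        if q ≠ d ∧ visitsOk max_visits d then t1 + q * multiplier else t1
      else total
    bInner house multiplier max_visits (d + 1) total1
  else total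
termination_by (house + 1 - d).toNat
decreasing_by
  have hdh : d ≤ house := by
    by_cases h0 : d ≤ 0
    · nlinarith
    · nlinarith
  omega

def solve_alt (target : Int) (multiplier : Int) (max_visits : Option Int) : Int :=
  let limit := PySem.Int.floordiv target 10
  (List.foldl (fun acc house =>
      match acc with
      | some h => some h
      | none =>
        if target ≤ bInner house multiplier max_visits 1 0 then some house else none)
    none (PySem.List.pyRange 1 (limit + 1) 1)).getD (-1)

-- ===== PRECONDITION & SPEC =====
def Spec_solve (target : Int) (multiplier : Int) (max_visits : Option Int) (out : Int) : Prop := out = solve_alt target multiplier max_visits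
instance (target : Int) (multiplier : Int) (max_visits : Option Int) (out : Int) : Decidable (Spec_solve target multiplier max_visits out) := by unfold Spec_solve; infer_instance

-- ===== CLAIM (what is proved, stated in full; the proofs are below) =====
def Claim_equal_solve : Prop := ∀ (target : Int) (multiplier : Int) (max_visits : Option Int), Dom_solve target multiplier max_visits → Spec_solve target multiplier max_visits (solve target multiplier max_visits)

-- ===== LEMMAS AND PROOFS =====

-- does the visit cap admit elf e for this house?
def okGate (house : Int) (max_visits : Option Int) (e : Int) : Bool :=
  match max_visits with | none => true | some m => decide (house ≤ m * e)

-- the value elf e contributes to a house (0 unless the visit cap admits it)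
def cval (house : Int) (multiplier : Int) (max_visits : Option Int) (e : Int) : Int :=
  if okGate house max_visits e then e * multiplier else 0

-- list sum over range(a, b+1) as a Finset.Icc sum
theorem sum_map_pyRange_Icc (f : Int → Int) (a b : Int) :
    ((PySem.List.pyRange a (b + 1) 1).map f).sum = ∑ e ∈ Finset.Icc a b, f e := by
  induction hn : (b + 1 - a).toNat generalizing b with
  | zero =>
    have hba : b + 1 ≤ a := by omega
    rw [PySem.List.pyRange_one_eq_nil hba, Finset.Icc_eq_empty (by omega)]
    simp
  | succ n ih =>
    have hab : a ≤ b := by omega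
    rw [PySem.List.pyRange_one_succ_right hab, List.map_append, List.sum_append]
    have h1 : ((PySem.List.pyRange a b 1).map f).sum = ∑ e ∈ Finset.Icc a (b - 1), f e := by
      have h := ih (b - 1) (by omega)
      rw [sub_add_cancel] at h
      exact h
    rw [h1]
    have h2 : Finset.Icc a b = insert b (Finset.Icc a (b - 1)) := by
      have h := Finset.insert_Icc_right_eq_Icc_add_one (a := a) (b := b - 1) (by omega)
      rw [sub_add_cancel] at h
      exact h.symm
    rw [h2, Finset.sum_insert (by simp)]
    simp [add_comm]


-- A's inner loop: adding c at a nodup list of in-range nonnegative indices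
theorem inner_loop (c : Int) (L : List Int) :
    ∀ (p : List Int), L.Nodup → (∀ x ∈ L, 0 ≤ x ∧ x.toNat < p.length) →
      ((List.foldl (fun q h => PySem.List.pySetD q h (PySem.List.pyGetD q h 0 + c)) p L).length = p.length ∧
       ∀ i : Int, 0 ≤ i →
         PySem.List.pyGetD (List.foldl (fun q h => PySem.List.pySetD q h (PySem.List.pyGetD q h 0 + c)) p L) i 0
           = PySem.List.pyGetD p i 0 + (if i ∈ L then c else 0)) := by
  induction L with
  | nil => intro p _ _; simp
  | cons x xs ih =>
    intro p hnd hb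
    have hx0 : 0 ≤ x := (hb x (by simp)).1
    have hxlen : x.toNat < p.length := (hb x (by simp)).2
    set p' := PySem.List.pySetD p x (PySem.List.pyGetD p x 0 + c) with hp'
    have hlen' : p'.length = p.length := PySem.List.length_pySetD p x _
    have hstep : ∀ i : Int, 0 ≤ i →
        PySem.List.pyGetD p' i 0 = if i = x then PySem.List.pyGetD p x 0 + c else PySem.List.pyGetD p i 0 := by
      intro i hi0
      have hxcast : (x.toNat : Int) = x := Int.toNat_of_nonneg hx0
      have hicast : (i.toNat : Int) = i := Int.toNat_of_nonneg hi0
      have h := PySem.List.pyGetD_pySetD_natCast p x.toNat i.toNat (PySem.List.pyGetD p x 0 + c) 0 hxlen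
      rw [hxcast, hicast] at h
      rw [hp', h]
      by_cases hix : i = x
      · simp [hix]
      · have : i.toNat ≠ x.toNat := by omega
        simp [this, hix]
    have hb' : ∀ y ∈ xs, 0 ≤ y ∧ y.toNat < p'.length := by
      intro y hy; rw [hlen']; exact hb y (by simp [hy])
    obtain ⟨ihlen, ihget⟩ := ih p' (List.nodup_cons.mp hnd).2 hb'
    have hxnotin : x ∉ xs := (List.nodup_cons.mp hnd).1
    refine ⟨by simpa [hlen'] using ihlen, ?_⟩
    intro i hi0
    have := ihget i hi0
    simp only [List.foldl_cons]
    rw [this, hstep i hi0]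
    by_cases hix : i = x
    · simp [hix, hxnotin]
    · simp [hix]


theorem nodup_pyRange_pos (a b : Int) {s : Int} (hs : 0 < s) :
    (PySem.List.pyRange a b s).Nodup := by
  rw [PySem.List.pyRange_of_pos a b hs]
  refine List.Nodup.map ?_ (List.nodup_range)
  intro k1 k2 hk
  have h1 : s * (k1 : Int) = s * (k2 : Int) := by
    have : a + s * (k1 : Int) = a + s * (k2 : Int) := hk
    omega
  have := mul_left_cancel₀ (by omega : (s:Int) ≠ 0) h1
  exact_mod_cast this

theorem maxHouse_le (limit : Int) (mv : Option Int) (e : Int) : maxHouse limit mv e ≤ limit := by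
  cases mv with
  | none => simp [maxHouse]
  | some m => simp [maxHouse]

-- A's elf loop: the sieve accumulates, per house, one term per elf
theorem sieve_loop (mult limit : Int) (mv : Option Int) (E : List Int) :
    ∀ (p : List Int), (∀ e ∈ E, 1 ≤ e) → p.length = (limit + 1).toNat →
      ((List.foldl (fun pres elf =>
          List.foldl (fun q h => PySem.List.pySetD q h (PySem.List.pyGetD q h 0 + elf * mult))
            pres (PySem.List.pyRange elf (maxHouse limit mv elf + 1) elf)) p E).length = p.length ∧
       ∀ h : Int, 0 ≤ h → h ≤ limit →
         PySem.List.pyGetD (List.foldl (fun pres elf =>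
          List.foldl (fun q h => PySem.List.pySetD q h (PySem.List.pyGetD q h 0 + elf * mult))
            pres (PySem.List.pyRange elf (maxHouse limit mv elf + 1) elf)) p E) h 0
           = PySem.List.pyGetD p h 0 +
             (E.map (fun e => if h ∈ PySem.List.pyRange e (maxHouse limit mv e + 1) e then e * mult else 0)).sum) := by
  induction E with
  | nil => intro p _ _; simp
  | cons e es ih =>
    intro p hpos hlen
    have he1 : (1:Int) ≤ e := hpos e (by simp)
    have hbnd : ∀ x ∈ PySem.List.pyRange e (maxHouse limit mv e + 1) e, 0 ≤ x ∧ x.toNat < p.length := by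
      intro x hx
      rw [PySem.List.mem_pyRange_iff_of_pos (by omega) x] at hx
      have hxm : x ≤ maxHouse limit mv e := by omega
      have := maxHouse_le limit mv e
      constructor
      · omega
      · rw [hlen]; omega
    obtain ⟨l1, g1⟩ := inner_loop (e * mult) (PySem.List.pyRange e (maxHouse limit mv e + 1) e) p
      (nodup_pyRange_pos _ _ (by omega)) hbnd
    obtain ⟨l2, g2⟩ := ih _ (fun x hx => hpos x (by simp [hx])) (by rw [l1, hlen])
    refine ⟨by rw [List.foldl_cons, l2, l1], ?_⟩
    intro h h0 hlim
    rw [List.foldl_cons] at *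
    rw [g2 h h0 hlim, g1 h h0]
    simp [add_assoc]


theorem dvd_sub_self_iff (e h : Int) : e ∣ h - e ↔ e ∣ h := by
  constructor
  · intro hd
    have := dvd_add hd (dvd_refl e)
    simpa using this
  · intro hd
    exact dvd_sub hd (dvd_refl e)

-- A's sieve value at a house, as a divisor sum over Icc 1 house
theorem sieve_char (mult limit : Int) (mv : Option Int) (house : Int)
    (h1 : 1 ≤ house) (h2 : house ≤ limit) :
    PySem.List.pyGetD (List.foldl (fun pres elf =>
        List.foldl (fun q h => PySem.List.pySetD q h (PySem.List.pyGetD q h 0 + elf * mult))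
          pres (PySem.List.pyRange elf (maxHouse limit mv elf + 1) elf))
        (List.replicate (limit + 1).toNat 0) (PySem.List.pyRange 1 (limit + 1) 1)) house 0
      = ∑ e ∈ Finset.Icc 1 house, (if e ∣ house then cval house mult mv e else 0) := by
  obtain ⟨_, hget⟩ := sieve_loop mult limit mv (PySem.List.pyRange 1 (limit + 1) 1)
    (List.replicate (limit + 1).toNat 0)
    (fun e he => by rw [PySem.List.mem_pyRange_one] at he; omega)
    (by simp)
  rw [hget house (by omega) h2]
  have hzero : PySem.List.pyGetD (List.replicate (limit + 1).toNat (0:Int)) house 0 = 0 := by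
    rw [PySem.List.pyGetD_of_nonneg _ _ (by omega)]
    simp [List.getD]
  rw [hzero, zero_add]
  rw [sum_map_pyRange_Icc (fun e => if house ∈ PySem.List.pyRange e (maxHouse limit mv e + 1) e then e * mult else 0) 1 limit]
  have hstep1 : ∀ e ∈ Finset.Icc (1:Int) limit,
      (if house ∈ PySem.List.pyRange e (maxHouse limit mv e + 1) e then e * mult else 0)
        = (if e ∣ house ∧ e ≤ house then cval house mult mv e else 0) := by
    intro e he
    rw [Finset.mem_Icc] at he
    have hdv : (e ∣ house - e) ↔ (e ∣ house) := dvd_sub_self_iff e house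
    simp only [PySem.List.mem_pyRange_iff_of_pos (show (0:Int) < e by omega), hdv]
    by_cases hd : e ∣ house
    · by_cases hle : e ≤ house
      · have hmh : (house < maxHouse limit mv e + 1) ↔ (okGate house mv e = true) := by
          cases mv with
          | none => simp [maxHouse, okGate]; omega
          | some m => simp [maxHouse, okGate]; omega
        simp [hle, hd, cval, hmh]
      · simp [hle, hd]
    · simp [hd]
  rw [Finset.sum_congr rfl hstep1]
  have hsub : Finset.Icc (1:Int) house ⊆ Finset.Icc 1 limit := Finset.Icc_subset_Icc (le_refl _) h2
  rw [← Finset.sum_subset hsub (by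
    intro e hel hem
    rw [Finset.mem_Icc] at hel
    rw [Finset.mem_Icc] at hem
    have : ¬ e ≤ house := by omega
    simp [this])]
  refine Finset.sum_congr rfl ?_
  intro e he
  rw [Finset.mem_Icc] at he
  simp [he.2]


-- B's √-bounded paired-divisor loop as a divisor sum over Icc 1 house
theorem bInner_sum (house mult : Int) (mv : Option Int) (hh : 1 ≤ house) :
    ∀ (n : Nat) (d t : Int), (house + 1 - d).toNat = n → 1 ≤ d →
      bInner house mult mv d t = t + ∑ e ∈ Finset.Icc 1 house,
        (if e ∣ house ∧ d ≤ e ∧ d * e ≤ house then cval house mult mv e else 0) := by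
  intro n
  induction n with
  | zero =>
    intro d t hn hd1
    have hdh : house < d := by omega
    have hdd : ¬ d * d ≤ house := by nlinarith
    rw [bInner.eq_def]
    simp only [dif_neg hdd]
    rw [Finset.sum_eq_zero, add_zero]
    intro e he
    rw [Finset.mem_Icc] at he
    split_ifs with hc
    · exfalso
      obtain ⟨_, hde, hpr⟩ := hc
      nlinarith
    · rfl
  | succ n ih =>
    intro d t hn hd1
    by_cases hdd : d * d ≤ house
    · have hdh : d ≤ house := by nlinarith
      rw [bInner.eq_def]
      simp only [dif_pos hdd]
      by_cases hdvd : d ∣ house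
      · have hmod : PySem.Int.mod house d = 0 := (PySem.Int.mod_eq_zero_iff_dvd house d).mpr hdvd
        set q := PySem.Int.floordiv house d with hqdef
        have hq : q * d = house := by
          rw [hqdef, PySem.Int.floordiv_eq_ediv_of_pos (by omega)]
          exact Int.ediv_mul_cancel hdvd
        have hdq : d ≤ q := by nlinarith
        have hg1 : visitsOk mv q = okGate house mv d := by
          cases mv with
          | none => rfl
          | some m =>
            simp only [visitsOk, okGate, decide_eq_decide]
            constructor
            · intro h; nlinarith
            · intro h; nlinarith
        have hg2 : visitsOk mv d = okGate house mv q := by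
          cases mv with
          | none => rfl
          | some m =>
            simp only [visitsOk, okGate, decide_eq_decide]
            constructor
            · intro h; nlinarith
            · intro h; nlinarith
        rw [ih (d + 1) _ (by omega) (by omega)]
        rw [if_pos hmod]
        simp only [hg1, hg2]
        -- the accumulator after this step
        have hT : (if q ≠ d ∧ okGate house mv q = true
                    then (if okGate house mv d = true then t + d * mult else t) + q * mult
                    else (if okGate house mv d = true then t + d * mult else t))
            = t + cval house mult mv d + (if q = d then 0 else cval house mult mv q) := by
          by_cases h1 : okGate house mv d = true
          · by_cases hqd : q = d
            · simp [hqd, cval, h1]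
            · by_cases h2 : okGate house mv q = true
              · simp [hqd, h1, h2, cval]
              · simp [hqd, h1, h2, cval]
          · by_cases hqd : q = d
            · simp [hqd, cval, h1]
            · by_cases h2 : okGate house mv q = true
              · simp [hqd, h1, h2, cval]
              · simp [hqd, h1, h2, cval]
        rw [hT]
        -- split the sum at d and q
        have hsum : ∑ e ∈ Finset.Icc 1 house, (if e ∣ house ∧ d ≤ e ∧ d * e ≤ house then cval house mult mv e else 0)
            = (∑ e ∈ Finset.Icc 1 house, (if e ∣ house ∧ d + 1 ≤ e ∧ (d + 1) * e ≤ house then cval house mult mv e else 0))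
              + (cval house mult mv d + (if q = d then 0 else cval house mult mv q)) := by
          have hpt : ∀ e ∈ Finset.Icc (1:Int) house,
              (if e ∣ house ∧ d ≤ e ∧ d * e ≤ house then cval house mult mv e else 0)
                = (if e ∣ house ∧ d + 1 ≤ e ∧ (d + 1) * e ≤ house then cval house mult mv e else 0)
                  + ((if e ∣ house ∧ d ≤ e ∧ d * e ≤ house then cval house mult mv e else 0)
                     - (if e ∣ house ∧ d + 1 ≤ e ∧ (d + 1) * e ≤ house then cval house mult mv e else 0)) := by
            intro e _; ring
          rw [Finset.sum_congr rfl hpt, Finset.sum_add_distrib]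
          congr 1
          -- the difference is supported on {d, q}
          have hoff : ∀ e ∈ Finset.Icc (1:Int) house, e ≠ d ∧ e ≠ q →
              ((if e ∣ house ∧ d ≤ e ∧ d * e ≤ house then cval house mult mv e else 0)
               - (if e ∣ house ∧ d + 1 ≤ e ∧ (d + 1) * e ≤ house then cval house mult mv e else 0)) = 0 := by
            intro e he ⟨hed, heq⟩
            rw [Finset.mem_Icc] at he
            have hiff : (e ∣ house ∧ d ≤ e ∧ d * e ≤ house) ↔ (e ∣ house ∧ d + 1 ≤ e ∧ (d + 1) * e ≤ house) := by
              constructor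
              · rintro ⟨hdv, hde, hpe⟩
                refine ⟨hdv, by omega, ?_⟩
                by_contra hgt
                obtain ⟨k, hk⟩ := hdv
                have hke : k = d := by nlinarith
                have : e = q := by
                  have hedh : e * d = house := by rw [hk, hke]
                  nlinarith
                exact heq this
              · rintro ⟨hdv, hde, hpe⟩
                refine ⟨hdv, by omega, ?_⟩
                nlinarith
            by_cases hc : e ∣ house ∧ d ≤ e ∧ d * e ≤ house
            · rw [if_pos hc, if_pos (hiff.mp hc)]; ring
            · rw [if_neg hc, if_neg (fun h => hc (hiff.mpr h))]; ring
          have hvald : ((if d ∣ house ∧ d ≤ d ∧ d * d ≤ house then cval house mult mv d else 0)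
               - (if d ∣ house ∧ d + 1 ≤ d ∧ (d + 1) * d ≤ house then cval house mult mv d else 0))
              = cval house mult mv d := by
            rw [if_pos ⟨hdvd, le_refl d, hdd⟩, if_neg (by omega)]
            ring
          by_cases hqd : q = d
          · rw [Finset.sum_eq_single d]
            · rw [hvald, if_pos hqd, add_zero]
            · intro e he hed
              exact hoff e he ⟨hed, by rw [hqd]; exact hed⟩
            · intro habs
              exfalso; exact habs (Finset.mem_Icc.mpr ⟨hd1, hdh⟩)
          · rw [Finset.sum_eq_add d q (fun h => hqd h.symm)]
            · rw [hvald, if_neg hqd]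
              congr 1
              have hqdvd : q ∣ house := ⟨d, hq.symm⟩
              rw [if_pos ⟨hqdvd, hdq, by nlinarith⟩, if_neg ?_]
              · ring
              · rintro ⟨_, hq1, hq2⟩
                nlinarith
            · intro e he hee
              exact hoff e he ⟨hee.1, hee.2⟩
            · intro habs
              exfalso; exact habs (Finset.mem_Icc.mpr ⟨hd1, hdh⟩)
            · intro habs
              exfalso
              exact habs (Finset.mem_Icc.mpr ⟨by nlinarith, by nlinarith⟩)
        rw [hsum]
        ring
      · have hmod : ¬ PySem.Int.mod house d = 0 := fun h => hdvd ((PySem.Int.mod_eq_zero_iff_dvd house d).mp h)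
        rw [ih (d + 1) _ (by omega) (by omega)]
        rw [if_neg hmod]
        congr 1
        refine Finset.sum_congr rfl ?_
        intro e he
        rw [Finset.mem_Icc] at he
        have hiff : (e ∣ house ∧ d ≤ e ∧ d * e ≤ house) ↔ (e ∣ house ∧ d + 1 ≤ e ∧ (d + 1) * e ≤ house) := by
          constructor
          · rintro ⟨hdv, hde, hpe⟩
            have hed : e ≠ d := fun h => hdvd (h ▸ hdv)
            refine ⟨hdv, by omega, ?_⟩
            by_contra hgt
            obtain ⟨k, hk⟩ := hdv
            have hke : k = d := by nlinarith
            exact hdvd ⟨e, by rw [hk, hke]; ring⟩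
          · rintro ⟨hdv, hde, hpe⟩
            refine ⟨hdv, by omega, ?_⟩
            nlinarith
        by_cases hc : e ∣ house ∧ d ≤ e ∧ d * e ≤ house
        · rw [if_pos hc, if_pos (hiff.mp hc)]
        · rw [if_neg hc, if_neg (fun h => hc (hiff.mpr h))]
    · rw [bInner.eq_def]
      simp only [dif_neg hdd]
      rw [Finset.sum_eq_zero, add_zero]
      intro e he
      rw [Finset.mem_Icc] at he
      split_ifs with hc
      · exfalso
        obtain ⟨_, hde, hpr⟩ := hc
        nlinarith
      · rfl

-- ===== VERDICT (by name: the statement is the Claim_ definition above) =====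
theorem solve_spec : Claim_equal_solve := by
  unfold Claim_equal_solve Spec_solve
  intro target multiplier max_visits _
  simp only [solve, solve_alt]
  refine congrArg (fun o : Option Int => o.getD (-1)) ?_
  refine PySem.List.foldl_congr_mem _ _ _ _ ?_
  intro acc x hx
  cases acc with
  | some h => rfl
  | none =>
    rw [PySem.List.mem_pyRange_one] at hx
    have hx1 : (1:Int) ≤ x := hx.1
    have hx2 : x ≤ PySem.Int.floordiv target 10 := by omega
    have hA := sieve_char multiplier (PySem.Int.floordiv target 10) max_visits x hx1 hx2
    have hB := bInner_sum x multiplier max_visits hx1 (x + 1 - 1).toNat 1 0 rfl (le_refl 1)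
    rw [hA, hB, zero_add]
    have hs : ∑ e ∈ Finset.Icc (1:Int) x, (if e ∣ x then cval x multiplier max_visits e else 0)
        = ∑ e ∈ Finset.Icc (1:Int) x, (if e ∣ x ∧ 1 ≤ e ∧ 1 * e ≤ x then cval x multiplier max_visits e else 0) := by
      refine Finset.sum_congr rfl ?_
      intro e he
      rw [Finset.mem_Icc] at he
      by_cases hd : e ∣ x
      · rw [if_pos hd, if_pos ⟨hd, he.1, by omega⟩]
      · rw [if_neg hd, if_neg (fun h => hd h.1)]
    rw [hs]
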